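-- pv_equiv track=rewrite | github.com/augustourquizu/datosPython | practica7.py | lista_pares
-- ===== SOURCE A (Python) =====
-- def lista_pares(s:list[float])->list[float]:
--     x=1
--     y=[]
--     for element in s:
--         if x%2==0:
--             x=1
--             y.append(0)
--         else:
--             x=x+1
--             y.append(element)
--     else:
--         return y
-- ===== SOURCE B (Python) =====
-- def lista_pares(s: list[float]) -> list[float]:
--     res = list(s)
--     res[1::2] = [0] * len(res[1::2])
--     return res
-- ===== Notes on version B (the rewrite author's own statement) =====
-- stated objective: simpler
-- what changed: Replaces the toggling-counter branch loop by copying the list and zeroing the odd-indexed positions with one strided slice assignment.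
import Mathlib
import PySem

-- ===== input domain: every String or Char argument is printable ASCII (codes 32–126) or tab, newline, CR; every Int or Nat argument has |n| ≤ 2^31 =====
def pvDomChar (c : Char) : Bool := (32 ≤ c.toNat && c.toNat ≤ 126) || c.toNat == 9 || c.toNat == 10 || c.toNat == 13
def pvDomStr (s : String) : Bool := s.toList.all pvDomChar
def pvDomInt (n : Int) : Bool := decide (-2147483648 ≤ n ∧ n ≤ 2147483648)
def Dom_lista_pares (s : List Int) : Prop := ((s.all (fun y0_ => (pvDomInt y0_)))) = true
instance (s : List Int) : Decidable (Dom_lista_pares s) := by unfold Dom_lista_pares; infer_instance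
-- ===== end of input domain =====

-- B copies the list and zeroes the odd-indexed positions with one strided bulk pass (simpler decomposition).

-- ===== PORT A =====
-- A's for-loop with the toggling counter x and accumulator y, as structural recursion on s.
def listaParesGo (x : Int) : List Int → List Int
  | [] => []
  | element :: rest =>
    if x % 2 == 0 then 0 :: listaParesGo 1 rest
    else element :: listaParesGo (x + 1) rest

def lista_pares (s : List Int) : List Int := listaParesGo 1 s

-- ===== PORT B =====
-- res = list(s); res[1::2] = [0]*…  ≡  each value at odd index becomes 0, others kept.
def lista_pares_alt (s : List Int) : List Int :=
  (PySem.List.enumerate s).map (fun p => if p.1 % 2 == 1 then 0 else p.2)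

-- ===== PRECONDITION & SPEC =====
def Spec_lista_pares (s : List Int) (out : List Int) : Prop := out = lista_pares_alt s
instance (s : List Int) (out : List Int) : Decidable (Spec_lista_pares s out) := by unfold Spec_lista_pares; infer_instance

-- ===== CLAIM (what is proved, stated in full; the proofs are below) =====
def Claim_equal_lista_pares : Prop := ∀ (s : List Int), Dom_lista_pares s → Spec_lista_pares s (lista_pares s)

-- ===== LEMMAS AND PROOFS =====
lemma listaParesGo_enum (s : List Int) : ∀ (k : Int),
    listaParesGo (k % 2 + 1) s
      = (PySem.List.enumerate s k).map (fun p => if p.1 % 2 == 1 then 0 else p.2) := by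
  induction s with
  | nil => intro k; simp [listaParesGo, PySem.List.enumerate_nil]
  | cons e t ih =>
    intro k
    rw [PySem.List.enumerate_cons, List.map_cons]
    by_cases h : k % 2 = 0
    · -- even index: element kept, counter goes 1 → 2
      have h3 : (k + 1) % 2 = 1 := by omega
      have ht := ih (k + 1); rw [h3] at ht; norm_num at ht
      rw [h]
      simp [listaParesGo, ht]
    · -- odd index: element replaced by 0, counter resets 2 → 1
      have h1 : k % 2 = 1 := by omega
      have h3 : (k + 1) % 2 = 0 := by omega
      have ht := ih (k + 1); rw [h3] at ht; norm_num at ht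
      rw [h1]
      simp [listaParesGo, ht]

-- ===== VERDICT (by name: the statement is the Claim_ definition above) =====
theorem lista_pares_spec : Claim_equal_lista_pares := by
  intro s _
  unfold Spec_lista_pares lista_pares lista_pares_alt
  have := listaParesGo_enum s 0
  simpa using this
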